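-- pv_equiv track=rewrite | github.com/TimCargan/chemise | src/chemise/utils.py | list_dict_to_dict_list
-- ===== SOURCE A (Python) =====
-- def list_dict_to_dict_list(dict_list):
--     if not dict_list:
--         return {}
--     keys = dict_list[0].keys()
--     res = {k: [] for k in keys}
--     for x in dict_list:
--         [res[k].append(x[k]) for k in keys]
--     return res
-- ===== SOURCE B (Python) =====
-- def list_dict_to_dict_list(dict_list):
--     # Build the value matrix row by row, transpose it with zip(*), then pair with keys.
--     if not dict_list:
--         return {}
--     keys = list(dict_list[0])
--     rows = [[d[k] for k in keys] for d in dict_list]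
--     return dict(zip(keys, map(list, zip(*rows))))
-- ===== Notes on version B (the rewrite author's own statement) =====
-- stated objective: idiomatic
-- what changed: Instead of A's single interleaved pass mutating per-key accumulator lists, B materialises the values as a row matrix, transposes it with zip(*rows), and zips the columns back with the keys.
import Mathlib
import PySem

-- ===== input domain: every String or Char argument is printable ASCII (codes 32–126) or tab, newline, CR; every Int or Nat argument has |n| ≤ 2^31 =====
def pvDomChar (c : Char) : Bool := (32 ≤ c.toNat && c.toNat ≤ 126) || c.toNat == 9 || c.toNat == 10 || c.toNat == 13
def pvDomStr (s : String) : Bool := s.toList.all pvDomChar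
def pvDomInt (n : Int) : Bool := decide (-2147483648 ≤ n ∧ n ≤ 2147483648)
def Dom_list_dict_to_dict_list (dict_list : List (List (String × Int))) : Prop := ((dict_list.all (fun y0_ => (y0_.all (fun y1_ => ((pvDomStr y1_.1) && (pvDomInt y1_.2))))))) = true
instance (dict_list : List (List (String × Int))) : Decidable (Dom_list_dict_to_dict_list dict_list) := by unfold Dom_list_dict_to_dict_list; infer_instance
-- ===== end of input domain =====

-- B builds the value matrix row by row and transposes it with zip(*rows), instead of
-- A's interleaved mutating pass; each inner List (String × Int) is a Python dict.

-- ===== PORT A =====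
-- A: empty guard, keys from first dict, res = {k: []}, then one pass over dict_list
-- appending x[k] to res[k] for every key (elements outer, keys inner), return res.
def list_dict_to_dict_list (dict_list : List (List (String × Int))) : List (String × List Int) :=
  match dict_list with
  | [] => []
  | x0 :: _ =>
    let keys := (PySem.Dict.ofList x0).keys
    let res0 : PySem.Dict String (List Int) :=
      keys.foldl (fun d k => d.insert k []) PySem.Dict.empty
    let res := dict_list.foldl
      (fun d x => keys.foldl
        (fun d k => d.modify k [] (fun v => v ++ [(PySem.Dict.ofList x).getD k 0])) d) res0
    res.items

-- ===== PORT B =====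
-- termination helper for pvZipStar (cited by name in its decreasing_by)
lemma pvZipStar_dec (rows : List (List Int)) (hne : rows ≠ [])
    (hall : ¬ rows.any (·.isEmpty) = true) :
    (rows.map (·.tail)).foldr (fun r s => r.length + s) 0 <
      rows.foldr (fun r s => r.length + s) 0 := by
  induction rows with
  | nil => exact absurd rfl hne
  | cons r rs ih =>
    simp only [List.any_cons, Bool.or_eq_true, not_or] at hall
    have hr : r ≠ [] := by
      intro h; subst h; exact hall.1 rfl
    cases rs with
    | nil =>
      simp only [List.map, List.foldr]
      have : r.tail.length < r.length := by
        cases r with | nil => exact absurd rfl hr | cons a t => simp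
      omega
    | cons r2 rs2 =>
      have := ih (by simp) (by simpa using hall.2)
      simp only [List.map, List.foldr] at *
      have : r.tail.length ≤ r.length := by cases r <;> simp
      omega

-- zip(*rows): Python's zip of the rows as iterators — while no row is exhausted,
-- emit the list of heads and advance every row.
def pvZipStar (rows : List (List Int)) : List (List Int) :=
  if h : rows = [] ∨ rows.any (·.isEmpty) then []
  else (rows.map (fun r => r.headD 0)) :: pvZipStar (rows.map (·.tail))
termination_by rows.foldr (fun r s => r.length + s) 0
decreasing_by
  rw [not_or] at h
  simpa using pvZipStar_dec rows h.1 h.2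

-- one row of the value matrix: [d[k] for k in keys]
def pvRow (keys : List String) (x : List (String × Int)) : List Int :=
  keys.map (fun k => (PySem.Dict.ofList x).getD k 0)

-- B: empty guard, keys = list(dict_list[0]), rows = value matrix, then
-- dict(zip(keys, map(list, zip(*rows)))).
def list_dict_to_dict_list_alt (dict_list : List (List (String × Int))) : List (String × List Int) :=
  match dict_list with
  | [] => []
  | x0 :: _ =>
    let keys := (PySem.Dict.ofList x0).keys
    let rows := dict_list.map (pvRow keys)
    keys.zip (pvZipStar rows)

-- ===== PRECONDITION & SPEC =====
-- Pre_ excludes inputs where some dict after the first lacks a key of the first dict: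
-- there Python A (and B alike) raises KeyError, so no value is being claimed.
def Pre_list_dict_to_dict_list (dict_list : List (List (String × Int))) : Prop :=
  ∀ x ∈ dict_list, ∀ p ∈ dict_list.headD [], ∃ q ∈ x, q.1 = p.1
instance (dict_list : List (List (String × Int))) : Decidable (Pre_list_dict_to_dict_list dict_list) := by unfold Pre_list_dict_to_dict_list; infer_instance

def pvWitness_list_dict_to_dict_list : (List (List (String × Int))) :=
  [[("a", 1), ("b", 2)], [("a", 3), ("b", 4)]]

def Spec_list_dict_to_dict_list (dict_list : List (List (String × Int))) (out : List (String × List Int)) : Prop := out = list_dict_to_dict_list_alt dict_list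
instance (dict_list : List (List (String × Int))) (out : List (String × List Int)) : Decidable (Spec_list_dict_to_dict_list dict_list out) := by unfold Spec_list_dict_to_dict_list; infer_instance

-- ===== CLAIM (what is proved, stated in full; the proofs are below) =====
def Claim_equal_list_dict_to_dict_list : Prop := ∀ (dict_list : List (List (String × Int))), Dom_list_dict_to_dict_list dict_list → Pre_list_dict_to_dict_list dict_list → Spec_list_dict_to_dict_list dict_list (list_dict_to_dict_list dict_list)

-- ===== LEMMAS AND PROOFS =====

-- B-side characterisation: transposing a rectangular matrix of shape l × K gives
-- one column per key.
lemma pvZipStar_map_map {α : Type} (K : List String) (l : List α) (hl : l ≠ [])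
    (f : α → String → Int) :
    pvZipStar (l.map (fun x => K.map (f x))) =
      K.map (fun k => l.map (fun x => f x k)) := by
  induction K generalizing f with
  | nil =>
    rw [pvZipStar.eq_def]
    simp only [List.map_nil]
    rw [dif_pos]
    right
    cases l with
    | nil => exact absurd rfl hl
    | cons a t => simp
  | cons k K ih =>
    rw [pvZipStar.eq_def]
    rw [dif_neg]
    · congr 1
      · simp
      · rw [List.map_map]
        simp only [Function.comp_def, List.map_cons, List.tail_cons]
        exact ih f
    · rw [not_or]
      constructor
      · cases l with
        | nil => exact absurd rfl hl
        | cons a t => simp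
      · simp

lemma zip_self_map {α β : Type} (l : List α) (g : α → β) :
    l.zip (l.map g) = l.map (fun x => (x, g x)) := by
  induction l with
  | nil => rfl
  | cons a t ih => simp [ih]

-- A-side characterisation lemmas
lemma inner_getD (x : List (String × Int)) (K : List String)
    (d : PySem.Dict String (List Int)) (c : String) :
    (K.foldl (fun d k => d.modify k [] (fun v => v ++ [(PySem.Dict.ofList x).getD k 0])) d).getD c [] =
      d.getD c [] ++ List.replicate (K.count c) ((PySem.Dict.ofList x).getD c 0) := by
  induction K generalizing d with
  | nil => simp
  | cons k K ih =>
    simp only [List.foldl_cons, ih, PySem.Dict.getD_modify]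
    by_cases h : c = k
    · subst h
      simp [List.append_assoc, ← List.replicate_succ]
    · simp [h, Ne.symm h]

lemma flatten_map_singleton {α β : Type} (l : List α) (f : α → β) :
    (l.map (fun x => [f x])).flatten = l.map f := by
  induction l with
  | nil => rfl
  | cons x l ih => simp [ih]

lemma inner_keys (x : List (String × Int)) (K : List String)
    (d : PySem.Dict String (List Int)) (h : ∀ k ∈ K, k ∈ d.keys) :
    (K.foldl (fun d k => d.modify k [] (fun v => v ++ [(PySem.Dict.ofList x).getD k 0])) d).keys = d.keys := by
  induction K generalizing d with
  | nil => rfl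
  | cons k K ih =>
    have hk : (d.modify k [] (fun v => v ++ [(PySem.Dict.ofList x).getD k 0])).keys = d.keys := by
      rw [PySem.Dict.keys_modify, PySem.Dict.keys_insert_of_contains]
      exact (PySem.Dict.contains_iff_mem_keys d k).2 (h k (List.mem_cons_self))
    simp only [List.foldl_cons]
    rw [ih _ (by rw [hk]; exact fun j hj => h j (List.mem_cons_of_mem _ hj)), hk]

lemma outer_getD (l : List (List (String × Int))) (K : List String)
    (d : PySem.Dict String (List Int)) (c : String) :
    (l.foldl (fun d x => K.foldl
        (fun d k => d.modify k [] (fun v => v ++ [(PySem.Dict.ofList x).getD k 0])) d) d).getD c [] =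
      d.getD c [] ++ (l.map (fun x => List.replicate (K.count c) ((PySem.Dict.ofList x).getD c 0))).flatten := by
  induction l generalizing d with
  | nil => simp
  | cons x l ih => simp [ih, inner_getD, List.append_assoc]

lemma outer_keys (l : List (List (String × Int))) (K : List String)
    (d : PySem.Dict String (List Int)) (h : ∀ k ∈ K, k ∈ d.keys) :
    (l.foldl (fun d x => K.foldl
        (fun d k => d.modify k [] (fun v => v ++ [(PySem.Dict.ofList x).getD k 0])) d) d).keys = d.keys := by
  induction l generalizing d with
  | nil => rfl
  | cons x l ih =>
    simp only [List.foldl_cons]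
    rw [ih, inner_keys x K d h]
    intro k hk
    rw [inner_keys x K d h]; exact h k hk

lemma res0_getD (K : List String) (d : PySem.Dict String (List Int)) (c : String)
    (h : d.getD c [] = []) :
    (K.foldl (fun d k => d.insert k ([] : List Int)) d).getD c [] = [] := by
  induction K generalizing d with
  | nil => exact h
  | cons k K ih =>
    simp only [List.foldl_cons]
    apply ih
    rw [PySem.Dict.getD_insert]
    split <;> simp [h]

lemma res0_keys (K : List String) (hK : K.Nodup) :
    (K.foldl (fun d k => d.insert k ([] : List Int)) PySem.Dict.empty).keys = K := by
  rw [PySem.Dict.keys_foldl_insert K (fun _ _ => ([] : List Int)) PySem.Dict.empty,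
    PySem.Dict.keys_empty, PySem.Set.update_nil_left]
  exact PySem.Set.ofList_eq_self_of_nodup K hK

-- ===== VERDICT (by name: the statement is the Claim_ definition above) =====
theorem list_dict_to_dict_list_spec : Claim_equal_list_dict_to_dict_list := by
  intro dict_list _ _
  unfold Spec_list_dict_to_dict_list list_dict_to_dict_list list_dict_to_dict_list_alt
  match dict_list with
  | [] => rfl
  | x0 :: rest =>
    simp only
    set K := (PySem.Dict.ofList x0).keys with hKdef
    have hnd : K.Nodup := PySem.Dict.nodup_keys_ofList x0
    -- B side: zip(*rows) = one column per key, so B = K.map (fun k => (k, column k))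
    have hB : K.zip (pvZipStar ((x0 :: rest).map (pvRow K))) =
        K.map (fun k => (k, (x0 :: rest).map (fun x => (PySem.Dict.ofList x).getD k 0))) := by
      unfold pvRow
      rw [pvZipStar_map_map K (x0 :: rest) (by simp)
        (fun x k => (PySem.Dict.ofList x).getD k 0)]
      exact zip_self_map K _
    rw [hB]
    -- A side
    set res0 := K.foldl (fun d k => d.insert k ([] : List Int)) PySem.Dict.empty with hres0
    have hkeys0 : res0.keys = K := res0_keys K hnd
    set res := (x0 :: rest).foldl
      (fun d x => K.foldl
        (fun d k => d.modify k [] (fun v => v ++ [(PySem.Dict.ofList x).getD k 0])) d) res0 with hres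
    have hkeys : res.keys = K := by
      rw [hres]
      rw [outer_keys (x0 :: rest) K res0 (by rw [hkeys0]; exact fun k hk => hk), hkeys0]
    have hndres : res.keys.Nodup := by rw [hkeys]; exact hnd
    rw [PySem.Dict.items_eq_map_keys res hndres ([] : List Int), hkeys]
    apply List.map_congr_left
    intro k hk
    have hcount : K.count k = 1 := List.count_eq_one_of_mem hnd hk
    have hval : res.getD k [] = (x0 :: rest).map (fun x => (PySem.Dict.ofList x).getD k 0) := by
      rw [hres]
      rw [outer_getD (x0 :: rest) K res0 k]
      rw [res0_getD K PySem.Dict.empty k (by simp)]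
      simp [hcount, flatten_map_singleton]
    simp [hval]
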